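-- pv_equiv track=rewrite | github.com/SukantoMette/Shortest_Path_and_network_equillibrium_algorithms | matrices.py | node_arc_incidence_matrix
-- ===== SOURCE A (Python) =====
-- def node_arc_incidence_matrix(downstream_node_dict, arcs):
--     '''
--
--     :param downstream_node_dict:
--     :param arcs:
--     :return: node_arc_incidence_matrix
--     '''
--     nodes = list(downstream_node_dict.keys())
--     mat = []
--     for node in nodes:
--         temp = []
--         for arc in arcs:
--             if (node == arc[0]):
--                 temp.append(1)
--             elif (node == arc[1]):
--                 temp.append(-1)
--             else:
--                 temp.append(0)
--         mat.append(temp)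
--     return mat
-- ===== SOURCE B (Python) =====
-- def node_arc_incidence_matrix(downstream_node_dict, arcs):
--     idx = {node: i for i, node in enumerate(downstream_node_dict.keys())}
--     mat = [[0] * len(arcs) for _ in range(len(idx))]
--     for j, arc in enumerate(arcs):
--         i = idx.get(arc[1])
--         if i is not None:
--             mat[i][j] = -1          # tail entry first ...
--         i = idx.get(arc[0])
--         if i is not None:
--             mat[i][j] = 1           # ... so a self-loop ends up as 1, like A's if/elif
--     return mat
-- ===== Notes on version B (the rewrite author's own statement) =====
-- stated objective: alternative
-- what changed: Instead of scanning all arcs once per node (nested compare loops), B builds a node-to-row index dict once, allocates the zero matrix, and scatters each arc's +1/-1 into its two rows in a single pass over the arcs.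
import Mathlib
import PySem

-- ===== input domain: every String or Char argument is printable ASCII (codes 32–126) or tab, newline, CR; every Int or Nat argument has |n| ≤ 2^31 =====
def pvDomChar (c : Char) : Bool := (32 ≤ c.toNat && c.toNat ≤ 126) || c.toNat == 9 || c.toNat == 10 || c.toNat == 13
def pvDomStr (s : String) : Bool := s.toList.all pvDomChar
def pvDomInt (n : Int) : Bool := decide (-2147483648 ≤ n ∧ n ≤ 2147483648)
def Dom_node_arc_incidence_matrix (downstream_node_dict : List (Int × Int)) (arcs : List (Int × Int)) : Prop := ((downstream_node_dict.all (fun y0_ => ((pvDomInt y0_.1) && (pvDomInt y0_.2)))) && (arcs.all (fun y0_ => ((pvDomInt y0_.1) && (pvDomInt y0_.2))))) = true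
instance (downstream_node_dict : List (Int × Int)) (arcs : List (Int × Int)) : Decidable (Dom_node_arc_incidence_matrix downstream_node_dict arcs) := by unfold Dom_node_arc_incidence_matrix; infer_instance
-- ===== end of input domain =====

-- B replaces A's per-node scan of all arcs by building a node→row index once and
-- scattering each arc's +1/−1 into the zero matrix in one pass over the arcs
-- (objective: alternative — a scatter construction instead of nested compare loops).

-- ===== PORT A =====
def node_arc_incidence_matrix (downstream_node_dict : List (Int × Int)) (arcs : List (Int × Int)) : List (List Int) :=
  let nodes := (PySem.Dict.ofList downstream_node_dict).keys
  nodes.foldl (fun mat node =>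
    mat ++ [arcs.foldl (fun temp arc =>
      temp ++ [if node = arc.1 then (1 : Int) else if node = arc.2 then -1 else 0]) []]) []

-- ===== PORT B =====
-- one step of B's scatter loop: write -1 at the tail row (if known), then +1 at the head row
def pvStep (idx : PySem.Dict Int Nat) (mat : List (List Int)) (p : (Int × Int) × Nat) : List (List Int) :=
  let mat1 :=
    match idx.get? p.1.2 with
    | some i => mat.set i ((mat.getD i []).set p.2 (-1))
    | none => mat
  match idx.get? p.1.1 with
  | some i => mat1.set i ((mat1.getD i []).set p.2 (1 : Int))
  | none => mat1

def node_arc_incidence_matrix_alt (downstream_node_dict : List (Int × Int)) (arcs : List (Int × Int)) : List (List Int) :=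
  let nodes := (PySem.Dict.ofList downstream_node_dict).keys
  let idx : PySem.Dict Int Nat :=
    nodes.zipIdx.foldl (fun acc p => acc.insert p.1 p.2) PySem.Dict.empty
  arcs.zipIdx.foldl (pvStep idx) (List.replicate idx.size (List.replicate arcs.length (0 : Int)))

-- ===== PRECONDITION & SPEC =====
def Spec_node_arc_incidence_matrix (downstream_node_dict : List (Int × Int)) (arcs : List (Int × Int)) (out : List (List Int)) : Prop := out = node_arc_incidence_matrix_alt downstream_node_dict arcs
instance (downstream_node_dict : List (Int × Int)) (arcs : List (Int × Int)) (out : List (List Int)) : Decidable (Spec_node_arc_incidence_matrix downstream_node_dict arcs out) := by unfold Spec_node_arc_incidence_matrix; infer_instance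

-- ===== CLAIM (what is proved, stated in full; the proofs are below) =====
def Claim_equal_node_arc_incidence_matrix : Prop := ∀ (downstream_node_dict : List (Int × Int)) (arcs : List (Int × Int)), Dom_node_arc_incidence_matrix downstream_node_dict arcs → Spec_node_arc_incidence_matrix downstream_node_dict arcs (node_arc_incidence_matrix downstream_node_dict arcs)

-- ===== LEMMAS AND PROOFS =====

-- the incidence coefficient of node n at arc a (A's if/elif chain)
def pvF (n : Int) (a : Int × Int) : Int := if n = a.1 then 1 else if n = a.2 then -1 else 0

-- B's index dict looks up exactly the first-occurrence index of a key
theorem pvMkZip_get (nodes : List Int) (v : Int) :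
    ∀ k : Nat, (PySem.Dict.mk (nodes.zipIdx k)).get? v
      = if v ∈ nodes then some (k + nodes.idxOf v) else none := by
  induction nodes with
  | nil => intro k; simp [PySem.Dict.get?]
  | cons n tl ih =>
    intro k
    rw [show (n :: tl).zipIdx k = (n, k) :: tl.zipIdx (k + 1) by simp [List.zipIdx]]
    rw [PySem.Dict.get?_mk_cons, ih (k + 1)]
    by_cases h : n = v
    · simp [h, List.idxOf_cons_self]
    · have : (n == v) = false := by simp [h]
      simp only [this, Bool.false_eq_true, if_false, List.mem_cons]
      by_cases hv : v ∈ tl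
      · simp [hv, Ne.symm h, h]
        omega
      · simp [hv, Ne.symm h]

theorem pvIdx_items (nodes : List Int) (hnd : nodes.Nodup) :
    (nodes.zipIdx.foldl (fun acc p => acc.insert p.1 p.2) PySem.Dict.empty).items
      = nodes.zipIdx := by
  have := PySem.Dict.items_foldl_insert_fresh (d := (PySem.Dict.empty : PySem.Dict Int Nat))
    (l := nodes.zipIdx) (k := Prod.fst) (v := Prod.snd)
    (by intro a _; simp [PySem.Dict.contains_empty])
    (by simpa using hnd)
  simpa using this

theorem pvIdx_get (nodes : List Int) (hnd : nodes.Nodup) (v : Int) :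
    (nodes.zipIdx.foldl (fun acc p => acc.insert p.1 p.2) PySem.Dict.empty).get? v
      = if v ∈ nodes then some (nodes.idxOf v) else none := by
  have : (nodes.zipIdx.foldl (fun acc p => acc.insert p.1 p.2) PySem.Dict.empty)
      = PySem.Dict.mk nodes.zipIdx := by
    apply PySem.Dict.ext; simpa using pvIdx_items nodes hnd
  rw [this]
  simpa using pvMkZip_get nodes v 0

-- setting the row at idxOf v in a mapped matrix rewrites the map pointwise
theorem pvMap_set_idxOf (nodes : List Int) (hnd : nodes.Nodup) (v : Int) (hv : v ∈ nodes)
    (g : Int → List Int) (x : List Int) :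
    (nodes.map g).set (nodes.idxOf v) x = nodes.map (fun n => if n = v then x else g n) := by
  induction nodes with
  | nil => simp at hv
  | cons n tl ih =>
    by_cases h : n = v
    · subst h
      have : ∀ m ∈ tl, m ≠ n := fun m hm => fun he => (List.nodup_cons.mp hnd).1 (he ▸ hm)
      simp [List.idxOf_cons_self, List.map_congr_left fun m hm => if_neg (this m hm)]
    · have hv' : v ∈ tl := by cases hv with | head => exact absurd rfl h | tail _ h' => exact h'
      have hb : (n == v) = false := by simp [h]
      simp [h, ih (List.nodup_cons.mp hnd).2 hv']

theorem pvMap_getD_idxOf (nodes : List Int) (v : Int) (hv : v ∈ nodes) (g : Int → List Int) :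
    (nodes.map g).getD (nodes.idxOf v) [] = g v := by
  have hlt : nodes.idxOf v < nodes.length := List.idxOf_lt_length_of_mem hv
  rw [List.getD_eq_getElem _ _ (by simpa using hlt)]
  simp [List.getElem_idxOf hlt]

theorem pvRow_set (r t : List Int) (c x : Int) (j : Nat) (hj : r.length = j) :
    (r ++ c :: t).set j x = r ++ x :: t := by subst hj; simp


-- effect of one scatter step on a matrix in row-map form
theorem pvStep_eq (nodes : List Int) (hnd : nodes.Nodup) (idx : PySem.Dict Int Nat)
    (hidx : ∀ v, idx.get? v = if v ∈ nodes then some (nodes.idxOf v) else none)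
    (a : Int × Int) (j0 : Nat) (rows : Int → List Int) (hlen : ∀ n, (rows n).length = j0)
    (m : Nat) :
    pvStep idx (nodes.map (fun n => rows n ++ List.replicate (m + 1) 0)) (a, j0)
      = nodes.map (fun n => (rows n ++ [pvF n a]) ++ List.replicate m 0) := by
  have hrep : List.replicate (m + 1) (0 : Int) = 0 :: List.replicate m 0 := rfl
  unfold pvStep
  simp only [hidx, hrep]
  by_cases h2 : a.2 ∈ nodes <;> by_cases h1 : a.1 ∈ nodes <;>
    simp only [h2, h1, if_true, if_false]
  · -- both endpoints are rows
    rw [pvMap_getD_idxOf nodes a.2 h2, pvRow_set _ _ _ _ _ (hlen a.2),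
        pvMap_set_idxOf nodes hnd a.2 h2,
        pvMap_getD_idxOf nodes a.1 h1, pvMap_set_idxOf nodes hnd a.1 h1]
    refine List.map_congr_left fun n hn => ?_
    by_cases heq : a.1 = a.2
    · by_cases e1 : n = a.1
      · simp [e1, heq, pvF, pvRow_set _ _ _ _ _ (hlen a.2)]
      · simp [e1, heq ▸ e1, pvF]
    · by_cases e1 : n = a.1 <;> by_cases e2 : n = a.2
      · exact absurd (e1 ▸ e2.symm ▸ rfl) heq
      · simp [e1, heq, pvF, pvRow_set _ _ _ _ _ (hlen a.1)]
      · have h21 : ¬ a.2 = a.1 := fun e => heq (Eq.symm e)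
        simp [e2, h21, pvF]
      · simp [e1, e2, pvF]
  · -- only the tail endpoint is a row
    rw [pvMap_getD_idxOf nodes a.2 h2, pvRow_set _ _ _ _ _ (hlen a.2),
        pvMap_set_idxOf nodes hnd a.2 h2]
    refine List.map_congr_left fun n hn => ?_
    have e1 : ¬ n = a.1 := fun e => h1 (e ▸ hn)
    have h21 : ¬ a.2 = a.1 := fun e => h1 (e ▸ h2)
    by_cases e2 : n = a.2 <;> simp [e1, e2, h21, pvF]
  · -- only the head endpoint is a row
    rw [pvMap_getD_idxOf nodes a.1 h1, pvRow_set _ _ _ _ _ (hlen a.1),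
        pvMap_set_idxOf nodes hnd a.1 h1]
    refine List.map_congr_left fun n hn => ?_
    have e2 : ¬ n = a.2 := fun e => h2 (e ▸ hn)
    by_cases e1 : n = a.1 <;> simp [e1, e2, pvF]
  · -- neither endpoint is a row
    refine List.map_congr_left fun n hn => ?_
    have e1 : ¬ n = a.1 := fun e => h1 (e ▸ hn)
    have e2 : ¬ n = a.2 := fun e => h2 (e ▸ hn)
    simp [e1, e2, pvF]

-- main invariant of B's scatter loop
theorem pvFoldInv (nodes : List Int) (hnd : nodes.Nodup) (idx : PySem.Dict Int Nat)
    (hidx : ∀ v, idx.get? v = if v ∈ nodes then some (nodes.idxOf v) else none)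
    (as : List (Int × Int)) :
    ∀ (j0 : Nat) (rows : Int → List Int), (∀ n, (rows n).length = j0) →
    (as.zipIdx j0).foldl (pvStep idx) (nodes.map (fun n => rows n ++ List.replicate as.length 0))
      = nodes.map (fun n => rows n ++ as.map (pvF n)) := by
  induction as with
  | nil => intro j0 rows _; simp
  | cons a rest ih =>
    intro j0 rows hlen
    rw [show (a :: rest).zipIdx j0 = (a, j0) :: rest.zipIdx (j0 + 1) by simp [List.zipIdx]]
    rw [List.foldl_cons]
    rw [show (a :: rest).length = rest.length + 1 from rfl,
       pvStep_eq nodes hnd idx hidx a j0 rows hlen rest.length, ih (j0 + 1) (fun n => rows n ++ [pvF n a]) (by intro n; simp [hlen n])]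
    refine List.map_congr_left fun n _ => ?_
    simp [pvF]

-- A's nested append-fold is the nested map
theorem pvA_eq_map (nodes : List Int) (arcs : List (Int × Int)) :
    nodes.foldl (fun mat node =>
      mat ++ [arcs.foldl (fun temp arc =>
        temp ++ [if node = arc.1 then (1 : Int) else if node = arc.2 then -1 else 0]) []]) []
    = nodes.map (fun n => arcs.map (pvF n)) := by
  rw [PySem.List.foldl_append_singleton_eq_map]
  refine List.map_congr_left fun n _ => ?_
  rw [PySem.List.foldl_append_singleton_eq_map]
  rfl

theorem pvAlt_eq (d arcs : List (Int × Int)) :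
    node_arc_incidence_matrix_alt d arcs
      = ((PySem.Dict.ofList d).keys).map (fun n => arcs.map (pvF n)) := by
  show arcs.zipIdx.foldl
      (pvStep (((PySem.Dict.ofList d).keys).zipIdx.foldl (fun acc p => acc.insert p.1 p.2) PySem.Dict.empty))
      (List.replicate (((PySem.Dict.ofList d).keys).zipIdx.foldl (fun acc p => acc.insert p.1 p.2) PySem.Dict.empty).size
        (List.replicate arcs.length (0 : Int))) = _
  have hnd : ((PySem.Dict.ofList d).keys).Nodup := PySem.Dict.nodup_keys_ofList d
  generalize (PySem.Dict.ofList d).keys = nodes at hnd ⊢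
  have hsize : (nodes.zipIdx.foldl (fun acc p => acc.insert p.1 p.2) PySem.Dict.empty).size
      = nodes.length := by
    simp [PySem.Dict.size, pvIdx_items nodes hnd]
  rw [hsize]
  have h0 : List.replicate nodes.length (List.replicate arcs.length (0 : Int))
      = nodes.map (fun n => (fun _ : Int => ([] : List Int)) n ++ List.replicate arcs.length 0) := by
    simp [← List.map_const']
  rw [h0, pvFoldInv nodes hnd _ (pvIdx_get nodes hnd) arcs 0 (fun _ => []) (fun _ => rfl)]
  simp

-- ===== VERDICT (by name: the statement is the Claim_ definition above) =====
theorem node_arc_incidence_matrix_spec : Claim_equal_node_arc_incidence_matrix := by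
  intro d arcs _
  unfold Spec_node_arc_incidence_matrix node_arc_incidence_matrix
  rw [pvA_eq_map, pvAlt_eq]
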